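-- pv_equiv track=rewrite | github.com/aajuvonen/inc2petri | winc2petri_tex.py | generate_petri_tex
-- ===== SOURCE A (Python) =====
-- def generate_petri_tex(matrix):
--     num_places = len(matrix)
--     num_transitions = len(matrix[0])
--     places = [f"v_{i+1}" for i in range(num_places)]
--     transitions = [f"e_{j+1}" for j in range(num_transitions)]
--     arcs = []
--     weights = []
--     for i in range(num_places):
--         for j in range(num_transitions):
--             weight = matrix[i][j]
--             if weight != 0:
--                 if weight > 0:
--                     arcs.append((transitions[j], places[i]))
--                 else:
--                     arcs.append((places[i], transitions[j]))
--                 weights.append(abs(weight))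
--
--     # Determine initial marking based on the sum of weights of outbound arcs
--     initial_marking = {}
--     for arc in arcs:
--         place = arc[0]
--         weight = weights[arcs.index(arc)]
--         if place in initial_marking:
--             initial_marking[place] += weight
--         else:
--             initial_marking[place] = weight
--
--     # Creating LaTeX representation
--     petri_tex = "\\begin{align*}\n"
--     petri_tex += "    N & = (P, T, F, W, M_0) \\\\\n"
--     petri_tex += "    P & = (" + ", ".join(places) + ") \\\\\n"
--     petri_tex += "    T & = (" + ", ".join(transitions) + ") \\\\\n"
--     petri_tex += "    F & = (" + ", ".join([f"({arc[0]}, {arc[1]})" for arc in arcs]) + ") \\\\\n"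
--     petri_tex += "    W & = (" + ", ".join(map(str, weights)) + ") \\\\\n"
--     petri_tex += "    M_0 & = (" + ", ".join([str(initial_marking.get(place, 0)) for place in places]) + ") \n"
--     petri_tex += "\\end{align*}"
--
--     return petri_tex
-- ===== SOURCE B (Python) =====
-- def _p(i):
--     return f"v_{i+1}"
--
-- def _t(j):
--     return f"e_{j+1}"
--
-- def generate_petri_tex(matrix):
--     n = len(matrix)
--     m = len(matrix[0])
--     cells = [(i, j) for i in range(n) for j in range(m) if matrix[i][j] != 0]
--     arcs = [f"({_t(j)}, {_p(i)})" if matrix[i][j] > 0 else f"({_p(i)}, {_t(j)})"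
--             for i, j in cells]
--     weights = [str(abs(matrix[i][j])) for i, j in cells]
--     marking = [str(sum(-matrix[i][j] for j in range(m) if matrix[i][j] < 0))
--                for i in range(n)]
--     lines = [
--         "\\begin{align*}",
--         "    N & = (P, T, F, W, M_0) \\\\",
--         "    P & = (" + ", ".join(_p(i) for i in range(n)) + ") \\\\",
--         "    T & = (" + ", ".join(_t(j) for j in range(m)) + ") \\\\",
--         "    F & = (" + ", ".join(arcs) + ") \\\\",
--         "    W & = (" + ", ".join(weights) + ") \\\\",
--         "    M_0 & = (" + ", ".join(marking) + ") ",
--         "\\end{align*}",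
--     ]
--     return "\n".join(lines)
-- ===== Notes on version B (the rewrite author's own statement) =====
-- stated objective: faster
-- what changed: Replaced A's imperative accumulation (nested append loop, name-keyed dict and quadratic arcs.index pass) by staged comprehensions over an explicit non-zero cell list, with each place's initial marking computed directly from its row and the output assembled as a joined line list.
import Mathlib
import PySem

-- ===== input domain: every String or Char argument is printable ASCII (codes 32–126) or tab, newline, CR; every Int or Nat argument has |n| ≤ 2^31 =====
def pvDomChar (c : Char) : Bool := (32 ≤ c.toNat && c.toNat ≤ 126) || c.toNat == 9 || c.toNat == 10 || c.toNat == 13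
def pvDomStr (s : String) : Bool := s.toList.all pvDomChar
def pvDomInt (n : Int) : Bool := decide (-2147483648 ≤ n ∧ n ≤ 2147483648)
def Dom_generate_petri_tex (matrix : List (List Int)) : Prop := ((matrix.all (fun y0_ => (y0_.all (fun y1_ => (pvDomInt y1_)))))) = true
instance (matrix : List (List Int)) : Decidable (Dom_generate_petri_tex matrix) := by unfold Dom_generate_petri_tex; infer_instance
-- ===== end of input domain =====

-- B replaces A's imperative accumulation (nested append loop, name-keyed dict and
-- quadratic arcs.index pass) by staged comprehensions over an explicit cell list,
-- computing each place's marking directly from its row (objective: faster).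

-- ===== PORT A =====
def generate_petri_tex (matrix : List (List Int)) : String :=
  let num_places : Int := matrix.length
  let num_transitions : Int := (PySem.List.pyGetD matrix 0 []).length
  let places : List String :=
    (PySem.List.pyRange 0 num_places).map (fun i => "v_" ++ PySem.Int.toStr (i + 1))
  let transitions : List String :=
    (PySem.List.pyRange 0 num_transitions).map (fun j => "e_" ++ PySem.Int.toStr (j + 1))
  let aw : List (String × String) × List Int :=
    (PySem.List.pyRange 0 num_places).foldl (fun aw i =>
      (PySem.List.pyRange 0 num_transitions).foldl (fun aw j =>
        let weight := PySem.List.pyGetD (PySem.List.pyGetD matrix i []) j 0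
        if weight ≠ 0 then
          if weight > 0 then
            (aw.1 ++ [(PySem.List.pyGetD transitions j "", PySem.List.pyGetD places i "")],
             aw.2 ++ [|weight|])
          else
            (aw.1 ++ [(PySem.List.pyGetD places i "", PySem.List.pyGetD transitions j "")],
             aw.2 ++ [|weight|])
        else aw) aw) ([], [])
  let arcs := aw.1
  let weights := aw.2
  let initial_marking : PySem.Dict String Int :=
    arcs.foldl (fun d arc =>
      let place := arc.1
      let weight := PySem.List.pyGetD weights (((PySem.List.index? arcs arc).getD 0 : Nat) : Int) 0
      if d.contains place then d.insert place (d.getD place 0 + weight)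
      else d.insert place weight) PySem.Dict.empty
  let petri_tex := "\\begin{align*}\n"
  let petri_tex := petri_tex ++ "    N & = (P, T, F, W, M_0) \\\\\n"
  let petri_tex := petri_tex ++ ("    P & = (" ++ PySem.Str.join ", " places ++ ") \\\\\n")
  let petri_tex := petri_tex ++ ("    T & = (" ++ PySem.Str.join ", " transitions ++ ") \\\\\n")
  let petri_tex := petri_tex ++ ("    F & = (" ++ PySem.Str.join ", "
      (arcs.map (fun arc => "(" ++ arc.1 ++ ", " ++ arc.2 ++ ")")) ++ ") \\\\\n")
  let petri_tex := petri_tex ++ ("    W & = (" ++ PySem.Str.join ", "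
      (weights.map PySem.Int.toStr) ++ ") \\\\\n")
  let petri_tex := petri_tex ++ ("    M_0 & = (" ++ PySem.Str.join ", "
      (places.map (fun place => PySem.Int.toStr (initial_marking.getD place 0))) ++ ") \n")
  petri_tex ++ "\\end{align*}"

-- ===== PORT B =====
-- Source B's helpers _p / _t
def pvP (i : Int) : String := "v_" ++ PySem.Int.toStr (i + 1)
def pvT (j : Int) : String := "e_" ++ PySem.Int.toStr (j + 1)

def generate_petri_tex_alt (matrix : List (List Int)) : String :=
  let n : Int := matrix.length
  let m : Int := (PySem.List.pyGetD matrix 0 []).length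
  let cells : List (Int × Int) :=
    (PySem.List.pyRange 0 n).flatMap (fun i =>
      ((PySem.List.pyRange 0 m).filter
        (fun j => PySem.List.pyGetD (PySem.List.pyGetD matrix i []) j 0 ≠ 0)).map (fun j => (i, j)))
  let arcs : List String := cells.map (fun c =>
    if PySem.List.pyGetD (PySem.List.pyGetD matrix c.1 []) c.2 0 > 0 then
      "(" ++ pvT c.2 ++ ", " ++ pvP c.1 ++ ")"
    else
      "(" ++ pvP c.1 ++ ", " ++ pvT c.2 ++ ")")
  let weights : List String :=
    cells.map (fun c => PySem.Int.toStr |PySem.List.pyGetD (PySem.List.pyGetD matrix c.1 []) c.2 0|)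
  let marking : List String := (PySem.List.pyRange 0 n).map (fun i =>
    PySem.Int.toStr (((PySem.List.pyRange 0 m).filter
        (fun j => PySem.List.pyGetD (PySem.List.pyGetD matrix i []) j 0 < 0)).map
      (fun j => -PySem.List.pyGetD (PySem.List.pyGetD matrix i []) j 0)).sum)
  PySem.Str.join "\n"
    [ "\\begin{align*}",
      "    N & = (P, T, F, W, M_0) \\\\",
      "    P & = (" ++ PySem.Str.join ", " ((PySem.List.pyRange 0 n).map (fun i => pvP i)) ++ ") \\\\",
      "    T & = (" ++ PySem.Str.join ", " ((PySem.List.pyRange 0 m).map (fun j => pvT j)) ++ ") \\\\",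
      "    F & = (" ++ PySem.Str.join ", " arcs ++ ") \\\\",
      "    W & = (" ++ PySem.Str.join ", " weights ++ ") \\\\",
      "    M_0 & = (" ++ PySem.Str.join ", " marking ++ ") ",
      "\\end{align*}" ]

-- ===== PRECONDITION & SPEC =====
-- Pre_ excludes exactly the inputs where A raises IndexError: the empty matrix
-- (matrix[0]) and matrices with a row shorter than row 0 (matrix[i][j]).
def Pre_generate_petri_tex (matrix : List (List Int)) : Prop :=
  matrix ≠ [] ∧ ∀ row ∈ matrix, (matrix.headD []).length ≤ row.length
instance (matrix : List (List Int)) : Decidable (Pre_generate_petri_tex matrix) := by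
  unfold Pre_generate_petri_tex; infer_instance
def pvWitness_generate_petri_tex : List (List Int) := [[1, -2], [0, 3]]
def Spec_generate_petri_tex (matrix : List (List Int)) (out : String) : Prop := out = generate_petri_tex_alt matrix
instance (matrix : List (List Int)) (out : String) : Decidable (Spec_generate_petri_tex matrix out) := by unfold Spec_generate_petri_tex; infer_instance

-- ===== CLAIM (what is proved, stated in full; the proofs are below) =====
def Claim_equal_generate_petri_tex : Prop := ∀ (matrix : List (List Int)), Dom_generate_petri_tex matrix → Pre_generate_petri_tex matrix → Spec_generate_petri_tex matrix (generate_petri_tex matrix)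

-- ===== LEMMAS AND PROOFS =====

-- canonical pieces both ports reduce to
def pvCell (matrix : List (List Int)) (i j : Int) : Int :=
  PySem.List.pyGetD (PySem.List.pyGetD matrix i []) j 0
def pvArc (matrix : List (List Int)) (i j : Int) : String × String :=
  if pvCell matrix i j > 0 then (pvT j, pvP i) else (pvP i, pvT j)
def pvRow (matrix : List (List Int)) (m i : Int) : List (Int × Int) :=
  ((PySem.List.pyRange 0 m).filter (fun j => pvCell matrix i j ≠ 0)).map (fun j => (i, j))
def pvC (matrix : List (List Int)) (n m : Int) : List (Int × Int) :=
  (PySem.List.pyRange 0 n).flatMap (pvRow matrix m)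
def pvMark (matrix : List (List Int)) (m i : Int) : Int :=
  ((PySem.List.pyRange 0 m).map (fun j =>
    if pvCell matrix i j > 0 then 0 else if pvCell matrix i j < 0 then -pvCell matrix i j else 0)).sum
def pvFmt (a : String × String) : String := "(" ++ a.1 ++ ", " ++ a.2 ++ ")"
def pvRender (matrix : List (List Int)) : String :=
  let n : Int := matrix.length
  let m : Int := (PySem.List.pyGetD matrix 0 []).length
  "\\begin{align*}\n" ++ "    N & = (P, T, F, W, M_0) \\\\\n" ++
  ("    P & = (" ++ PySem.Str.join ", " ((PySem.List.pyRange 0 n).map (fun i => "v_" ++ PySem.Int.toStr (i + 1))) ++ ") \\\\\n") ++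
  ("    T & = (" ++ PySem.Str.join ", " ((PySem.List.pyRange 0 m).map (fun j => "e_" ++ PySem.Int.toStr (j + 1))) ++ ") \\\\\n") ++
  ("    F & = (" ++ PySem.Str.join ", " ((pvC matrix n m).map (fun p => pvFmt (pvArc matrix p.1 p.2))) ++ ") \\\\\n") ++
  ("    W & = (" ++ PySem.Str.join ", " (((pvC matrix n m).map (fun p => |pvCell matrix p.1 p.2|)).map PySem.Int.toStr) ++ ") \\\\\n") ++
  ("    M_0 & = (" ++ PySem.Str.join ", " (((PySem.List.pyRange 0 n).map (fun i => pvMark matrix m i)).map PySem.Int.toStr) ++ ") \n") ++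
  "\\end{align*}"

-- generic fold shape for A's nested append loop
theorem pv_foldl_pair {α β γ : Type} (l : List α) (f : α → List β) (g : α → List γ)
    (step : List β × List γ → α → List β × List γ)
    (hstep : ∀ s x, x ∈ l → step s x = (s.1 ++ f x, s.2 ++ g x)) :
    ∀ acc, l.foldl step acc = (acc.1 ++ l.flatMap f, acc.2 ++ l.flatMap g) := by
  induction l with
  | nil => intro acc; simp
  | cons x l ih =>
    intro acc
    rw [List.foldl_cons, hstep _ _ (List.mem_cons_self), ih (fun s y hy => hstep s y (List.mem_cons_of_mem _ hy))]
    simp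

theorem pv_flatMap_if {α β : Type} (l : List α) (p : α → Prop) [DecidablePred p] (g : α → β) :
    (l.flatMap (fun x => if p x then [g x] else [])) = (l.filter (fun x => decide (p x))).map g := by
  induction l with
  | nil => rfl
  | cons x l ih => by_cases h : p x <;> simp [h, ih]

theorem pv_sum_map_ite {α : Type} (l : List α) (p : α → Bool) (g : α → Int) :
    ((l.filter p).map g).sum = (l.map (fun x => if p x then g x else 0)).sum := by
  induction l with
  | nil => rfl
  | cons x l ih => by_cases h : p x <;> simp [h, ih]

-- digit-string injectivity
def pvRep (n : Nat) : List Char :=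
  if _h : n < 10 then [Nat.digitChar n]
  else pvRep (n / 10) ++ [Nat.digitChar (n % 10)]
decreasing_by exact Nat.div_lt_self (by omega) (by omega)

theorem pv_toDigitsCore_eq_rep : ∀ (f n : Nat) (l : List Char), n < f →
    Nat.toDigitsCore 10 f n l = pvRep n ++ l := by
  intro f
  induction f with
  | zero => intro n l h; omega
  | succ f ih =>
    intro n l h
    rw [Nat.toDigitsCore]
    by_cases h10 : n < 10
    · have : n / 10 = 0 := Nat.div_eq_of_lt h10
      simp [this, pvRep, h10, Nat.mod_eq_of_lt h10]
    · have hne : ¬ n / 10 = 0 := by omega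
      rw [if_neg hne, ih (n / 10) _ (by omega)]
      conv_rhs => rw [pvRep.eq_def]
      rw [dif_neg h10]
      simp

theorem pv_digitChar_inj (a b : Nat) (ha : a < 10) (hb : b < 10)
    (h : Nat.digitChar a = Nat.digitChar b) : a = b := by
  interval_cases a <;> interval_cases b <;> first | rfl | (exfalso; revert h; decide)

theorem pvRep_ne_nil (n : Nat) : pvRep n ≠ [] := by
  rw [pvRep]; split <;> simp

theorem pvRep_inj : ∀ (a b : Nat), pvRep a = pvRep b → a = b := by
  intro a
  induction a using Nat.strong_induction_on with
  | _ a ih =>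
    intro b h
    conv_lhs at h => rw [pvRep.eq_def]
    conv_rhs at h => rw [pvRep.eq_def]
    split at h <;> split at h
    · simp only [List.cons.injEq, and_true] at h
      exact pv_digitChar_inj _ _ ‹_› ‹_› h
    · exfalso
      rcases List.append_eq_singleton_iff.mp h.symm with ⟨h1, h2⟩ | ⟨h1, h2⟩
      · exact pvRep_ne_nil _ h1
      · simp at h2
    · exfalso
      rcases List.append_eq_singleton_iff.mp h with ⟨h1, h2⟩ | ⟨h1, h2⟩
      · exact pvRep_ne_nil _ h1
      · simp at h2
    · have h2 := List.append_inj' h (by simp)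
      have hd := pv_digitChar_inj _ _ (Nat.mod_lt _ (by omega)) (Nat.mod_lt _ (by omega)) (by simpa using h2.2)
      have hq := ih (a / 10) (Nat.div_lt_self (by omega) (by omega)) (b / 10) h2.1
      omega

theorem pv_toChars_inj (a b : Int) (ha : 0 ≤ a) (hb : 0 ≤ b)
    (h : PySem.Int.toChars a = PySem.Int.toChars b) : a = b := by
  rw [PySem.Int.toChars, PySem.Int.toChars, if_neg (by omega), if_neg (by omega)] at h
  rw [Nat.toDigits, Nat.toDigits, pv_toDigitsCore_eq_rep _ _ _ (Nat.lt_succ_self _),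
      pv_toDigitsCore_eq_rep _ _ _ (Nat.lt_succ_self _)] at h
  simp at h
  have := pvRep_inj _ _ h
  omega

theorem pvP_inj (i i' : Int) (hi : 0 ≤ i) (hi' : 0 ≤ i') (h : pvP i = pvP i') : i = i' := by
  have : (pvP i).toList = (pvP i').toList := by rw [h]
  simp only [pvP, String.toList_append] at this
  have h2 : (PySem.Int.toStr (i + 1)).toList = (PySem.Int.toStr (i' + 1)).toList := by
    have hv : ("v_" : String).toList = ['v', '_'] := by decide
    rw [hv] at this; simpa using this
  rw [PySem.Int.toList_toStr, PySem.Int.toList_toStr] at h2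
  have := pv_toChars_inj (i + 1) (i' + 1) (by omega) (by omega) h2
  omega

theorem pvT_inj (j j' : Int) (hj : 0 ≤ j) (hj' : 0 ≤ j') (h : pvT j = pvT j') : j = j' := by
  have : (pvT j).toList = (pvT j').toList := by rw [h]
  simp only [pvT, String.toList_append] at this
  have h2 : (PySem.Int.toStr (j + 1)).toList = (PySem.Int.toStr (j' + 1)).toList := by
    have hv : ("e_" : String).toList = ['e', '_'] := by decide
    rw [hv] at this; simpa using this
  rw [PySem.Int.toList_toStr, PySem.Int.toList_toStr] at h2
  have := pv_toChars_inj (j + 1) (j' + 1) (by omega) (by omega) h2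
  omega

theorem pvT_ne_pvP (j i : Int) : pvT j ≠ pvP i := by
  intro h
  have : (pvT j).toList = (pvP i).toList := by rw [h]
  have he : ("e_" : String).toList = ['e', '_'] := by decide
  have hv : ("v_" : String).toList = ['v', '_'] := by decide
  simp only [pvT, pvP, String.toList_append, he, hv] at this
  simp at this

-- membership facts
theorem pv_mem_row_fst {matrix : List (List Int)} {m i : Int} {p : Int × Int}
    (hp : p ∈ pvRow matrix m i) : p.1 = i := by
  simp only [pvRow, List.mem_map] at hp
  obtain ⟨j, _, rfl⟩ := hp
  rfl

theorem pv_mem_row {matrix : List (List Int)} {m i : Int} {p : Int × Int}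
    (hp : p ∈ pvRow matrix m i) : p.1 = i ∧ 0 ≤ p.2 ∧ p.2 < m ∧ pvCell matrix i p.2 ≠ 0 := by
  simp only [pvRow, List.mem_map, List.mem_filter, PySem.List.mem_pyRange_one] at hp
  obtain ⟨j, ⟨⟨hj0, hjm⟩, hne⟩, rfl⟩ := hp
  exact ⟨rfl, hj0, hjm, by simpa using hne⟩

theorem pv_mem_C {matrix : List (List Int)} {n m : Int} {p : Int × Int}
    (hp : p ∈ pvC matrix n m) :
    0 ≤ p.1 ∧ p.1 < n ∧ 0 ≤ p.2 ∧ p.2 < m ∧ pvCell matrix p.1 p.2 ≠ 0 := by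
  simp only [pvC, List.mem_flatMap, PySem.List.mem_pyRange_one] at hp
  obtain ⟨i, ⟨hi0, hin⟩, hpi⟩ := hp
  obtain ⟨h1, h2, h3, h4⟩ := pv_mem_row hpi
  subst h1
  exact ⟨hi0, hin, h2, h3, h4⟩

theorem pv_nodup_C (matrix : List (List Int)) (n m : Int) : (pvC matrix n m).Nodup := by
  rw [pvC, List.nodup_flatMap]
  constructor
  · intro i _
    rw [pvRow]
    exact List.Nodup.map (fun a b h => by simpa using h)
      ((PySem.List.nodup_pyRange_one 0 m).filter _)
  · refine (PySem.List.pairwise_lt_pyRange_one 0 n).imp ?_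
    intro i1 i2 hlt a ha1 ha2
    have h1 := pv_mem_row_fst ha1
    have h2 := pv_mem_row_fst ha2
    omega

theorem pv_nodup_arcs (matrix : List (List Int)) (n m : Int) :
    ((pvC matrix n m).map (fun p => pvArc matrix p.1 p.2)).Nodup := by
  refine List.Nodup.map_on ?_ (pv_nodup_C matrix n m)
  intro x hx y hy h
  obtain ⟨hx1, _, hx2, _, _⟩ := pv_mem_C hx
  obtain ⟨hy1, _, hy2, _, _⟩ := pv_mem_C hy
  rw [pvArc, pvArc] at h
  split_ifs at h with h1 h2 h2 <;> rw [Prod.mk.injEq] at h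
  · exact Prod.ext (pvP_inj _ _ hx1 hy1 h.2) (pvT_inj _ _ hx2 hy2 h.1)
  · exact absurd h.1 (pvT_ne_pvP _ _)
  · exact absurd h.2 (pvT_ne_pvP _ _)
  · exact Prod.ext (pvP_inj _ _ hx1 hy1 h.1) (pvT_inj _ _ hx2 hy2 h.2)

def pvDictOf (arcs : List (String × String)) (weights : List Int) : PySem.Dict String Int :=
  arcs.foldl (fun d arc =>
    let place := arc.1
    let weight := PySem.List.pyGetD weights (((PySem.List.index? arcs arc).getD 0 : Nat) : Int) 0
    if d.contains place then d.insert place (d.getD place 0 + weight)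
    else d.insert place weight) PySem.Dict.empty

theorem pv_foldl_fn_zip {α β δ : Type} (wt : α → β) (q : δ → α → β → δ) :
    ∀ (xs : List α) (ys : List β), xs.length = ys.length →
    (∀ (k : Nat) (hk : k < xs.length) (hk' : k < ys.length), wt xs[k] = ys[k]) →
    ∀ d, xs.foldl (fun d x => q d x (wt x)) d = (xs.zip ys).foldl (fun d p => q d p.1 p.2) d := by
  intro xs
  induction xs with
  | nil => intro ys _ _ d; simp
  | cons x xs ih =>
    intro ys hlen hk d
    cases ys with
    | nil => simp at hlen
    | cons y ys =>
      rw [List.zip_cons_cons, List.foldl_cons, List.foldl_cons]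
      have h0 : wt x = y := hk 0 (by simp) (by simp)
      rw [h0]
      exact ih ys (by simpa using hlen) (fun k hk1 hk2 => hk (k + 1) (by simpa using hk1) (by simpa using hk2)) _

theorem pv_getD_accum {α : Type} (key : α → String) (wv : α → Int) :
    ∀ (l : List α) (d : PySem.Dict String Int) (k : String),
    (l.foldl (fun d p => if d.contains (key p) then d.insert (key p) (d.getD (key p) 0 + wv p)
        else d.insert (key p) (wv p)) d).getD k 0
      = d.getD k 0 + ((l.filter (fun p => key p == k)).map wv).sum := by
  intro l
  induction l with
  | nil => intro d k; simp
  | cons p l ih =>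
    intro d k
    have hstep : (if d.contains (key p) then d.insert (key p) (d.getD (key p) 0 + wv p)
        else d.insert (key p) (wv p)) = d.insert (key p) (d.getD (key p) 0 + wv p) := by
      by_cases hc : d.contains (key p)
      · rw [if_pos hc]
      · rw [if_neg (by simp [hc]), PySem.Dict.getD_of_not_contains d 0 (by simpa using hc), zero_add]
    rw [List.foldl_cons, hstep, ih]
    by_cases hk : key p = k
    · rw [List.filter_cons_of_pos (by simpa using hk), List.map_cons, List.sum_cons,
        PySem.Dict.getD_insert, if_pos hk.symm, hk]
      ring
    · rw [List.filter_cons_of_neg (by simpa using hk), PySem.Dict.getD_insert,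
        if_neg (fun h => hk h.symm)]

theorem pv_flatMap_single {α β : Type} :
    ∀ (l : List α), l.Nodup → ∀ (x : α), x ∈ l → ∀ (f : α → List β),
    (∀ y ∈ l, y ≠ x → f y = []) → l.flatMap f = f x := by
  intro l
  induction l with
  | nil => intro _ x hx; exact absurd hx (List.not_mem_nil)
  | cons a l ih =>
    intro hnd x hx f h0
    rw [List.flatMap_cons]
    rcases List.mem_cons.mp hx with rfl | hx'
    · have : l.flatMap f = [] := by
        apply List.flatMap_eq_nil_iff.mpr
        intro y hy
        exact h0 y (List.mem_cons_of_mem _ hy) (fun he => (List.nodup_cons.mp hnd).1 (he ▸ hy))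
      rw [this, List.append_nil]
    · rw [h0 a (List.mem_cons_self) (fun he => (List.nodup_cons.mp hnd).1 (he ▸ hx')),
        List.nil_append]
      exact ih (List.nodup_cons.mp hnd).2 x hx' f (fun y hy => h0 y (List.mem_cons_of_mem _ hy))

-- the per-place marking A's dict computes, read off from the canonical arc list
theorem pv_marking (matrix : List (List Int)) (n m i : Int) (hi0 : 0 ≤ i) (hin : i < n) :
    ((((pvC matrix n m).map (fun p => (pvArc matrix p.1 p.2, |pvCell matrix p.1 p.2|))).filter
        (fun q => q.1.1 == pvP i)).map (fun q => q.2)).sum = pvMark matrix m i := by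
  rw [List.filter_map, List.map_map, pvC, List.filter_flatMap]
  have hsingle : (PySem.List.pyRange 0 n).flatMap
      (fun i' => (pvRow matrix m i').filter
        (((fun q => q.1.1 == pvP i)) ∘ fun p => (pvArc matrix p.1 p.2, |pvCell matrix p.1 p.2|)))
      = (pvRow matrix m i).filter
        (((fun q => q.1.1 == pvP i)) ∘ fun p => (pvArc matrix p.1 p.2, |pvCell matrix p.1 p.2|)) := by
    apply pv_flatMap_single _ (PySem.List.nodup_pyRange_one 0 n) i
      (PySem.List.mem_pyRange_one.mpr ⟨hi0, hin⟩)
    intro i' hi' hne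
    apply List.filter_eq_nil_iff.mpr
    intro p hp
    obtain ⟨hp1, _, _, hcne⟩ := pv_mem_row hp
    have hi'0 : 0 ≤ i' := (PySem.List.mem_pyRange_one.mp hi').1
    simp only [Function.comp]
    rw [pvArc]
    split_ifs with hpos
    · simpa using pvT_ne_pvP p.2 i
    · subst hp1
      simpa using fun h => hne (pvP_inj _ _ hi'0 hi0 h)
  rw [hsingle, pvRow, List.filter_map, List.map_map, List.filter_filter]
  have hfc : ∀ j ∈ PySem.List.pyRange 0 m,
      ((((fun q => q.1.1 == pvP i) ∘ fun p => (pvArc matrix p.1 p.2, |pvCell matrix p.1 p.2|)) ∘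
        fun j => (i, j)) j && decide ¬pvCell matrix i j = 0) = decide (pvCell matrix i j < 0) := by
    intro j _
    simp only [Function.comp]
    rw [pvArc]
    rcases lt_trichotomy (pvCell matrix i j) 0 with hc | hc | hc
    · rw [if_neg (by omega)]
      simp [hc, show ¬pvCell matrix i j = 0 by omega]
    · simp [hc]
    · rw [if_pos hc]
      simp [show ¬pvCell matrix i j < 0 by omega, beq_eq_false_iff_ne.mpr (pvT_ne_pvP j i)]
  rw [List.filter_congr hfc, pvMark, pv_sum_map_ite]
  apply congrArg
  apply List.map_congr_left
  intro j _
  simp only [Function.comp]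
  by_cases hc : pvCell matrix i j < 0
  · rw [if_pos (by simpa using hc), if_neg (by omega), if_pos hc, abs_of_neg hc]
  · rw [if_neg (by simpa using hc)]
    split_ifs <;> rfl

theorem pv_dict_value (matrix : List (List Int)) (n m i : Int) (hi0 : 0 ≤ i) (hin : i < n) :
    (pvDictOf ((pvC matrix n m).map (fun p => pvArc matrix p.1 p.2))
        ((pvC matrix n m).map (fun p => |pvCell matrix p.1 p.2|))).getD (pvP i) 0
      = pvMark matrix m i := by
  rw [pvDictOf]
  have harcs := pv_nodup_arcs matrix n m
  have hzip := pv_foldl_fn_zip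
    (fun arc => PySem.List.pyGetD ((pvC matrix n m).map (fun p => |pvCell matrix p.1 p.2|))
      (((PySem.List.index? ((pvC matrix n m).map (fun p => pvArc matrix p.1 p.2)) arc).getD 0 : Nat) : Int) 0)
    (fun d arc w => if d.contains arc.1 then d.insert arc.1 (d.getD arc.1 0 + w) else d.insert arc.1 w)
    ((pvC matrix n m).map (fun p => pvArc matrix p.1 p.2))
    ((pvC matrix n m).map (fun p => |pvCell matrix p.1 p.2|))
    (by simp)
    (by
      intro k hk hk'
      have hidx : PySem.List.index? ((pvC matrix n m).map (fun p => pvArc matrix p.1 p.2))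
          (((pvC matrix n m).map (fun p => pvArc matrix p.1 p.2))[k]) = some k := by
        rw [PySem.List.index?_eq_idxOf?]
        apply List.idxOf?_eq_some_iff.mpr
        refine ⟨hk, rfl, fun j hj he => ?_⟩
        have := (List.Nodup.getElem_inj_iff harcs).mp he
        omega
      beta_reduce
      rw [hidx, Option.getD_some, PySem.List.pyGetD_natCast, List.getD_eq_getElem _ _ hk'])
    PySem.Dict.empty
  rw [hzip, List.zip_map']
  have haccum := pv_getD_accum (fun q => q.1.1) (fun q => q.2)
    ((pvC matrix n m).map (fun p => (pvArc matrix p.1 p.2, |pvCell matrix p.1 p.2|)))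
    PySem.Dict.empty (pvP i)
  rw [haccum, PySem.Dict.getD_empty, zero_add]
  exact pv_marking matrix n m i hi0 hin

theorem pvA_M0 (matrix : List (List Int)) (n m : Int) :
    ((PySem.List.pyRange 0 n).map (fun i => "v_" ++ PySem.Int.toStr (i + 1))).map
      (fun place => PySem.Int.toStr ((pvDictOf
          ((pvC matrix n m).map (fun p => pvArc matrix p.1 p.2))
          ((pvC matrix n m).map (fun p => |pvCell matrix p.1 p.2|))).getD place 0))
    = ((PySem.List.pyRange 0 n).map (fun i => pvMark matrix m i)).map PySem.Int.toStr := by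
  rw [List.map_map, List.map_map]
  apply List.map_congr_left
  intro i hi
  obtain ⟨hi0, hin⟩ := PySem.List.mem_pyRange_one.mp hi
  show PySem.Int.toStr ((pvDictOf
      ((pvC matrix n m).map (fun p => pvArc matrix p.1 p.2))
      ((pvC matrix n m).map (fun p => |pvCell matrix p.1 p.2|))).getD (pvP i) 0) = _
  rw [pv_dict_value matrix n m i hi0 hin]
  rfl

theorem pvA_fold (matrix : List (List Int)) (n m : Int) :
    ((PySem.List.pyRange 0 n).foldl (fun aw i =>
      (PySem.List.pyRange 0 m).foldl (fun aw j =>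
        if PySem.List.pyGetD (PySem.List.pyGetD matrix i []) j 0 ≠ 0 then
          if PySem.List.pyGetD (PySem.List.pyGetD matrix i []) j 0 > 0 then
            (aw.1 ++ [(PySem.List.pyGetD ((PySem.List.pyRange 0 m).map (fun j => "e_" ++ PySem.Int.toStr (j + 1))) j "",
                       PySem.List.pyGetD ((PySem.List.pyRange 0 n).map (fun i => "v_" ++ PySem.Int.toStr (i + 1))) i "")],
             aw.2 ++ [|PySem.List.pyGetD (PySem.List.pyGetD matrix i []) j 0|])
          else
            (aw.1 ++ [(PySem.List.pyGetD ((PySem.List.pyRange 0 n).map (fun i => "v_" ++ PySem.Int.toStr (i + 1))) i "",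
                       PySem.List.pyGetD ((PySem.List.pyRange 0 m).map (fun j => "e_" ++ PySem.Int.toStr (j + 1))) j "")],
             aw.2 ++ [|PySem.List.pyGetD (PySem.List.pyGetD matrix i []) j 0|])
        else aw) aw) (([], []) : List (String × String) × List Int))
    = ((pvC matrix n m).map (fun p => pvArc matrix p.1 p.2),
       (pvC matrix n m).map (fun p => |pvCell matrix p.1 p.2|)) := by
  refine (pv_foldl_pair _ (fun i => (pvRow matrix m i).map (fun p => pvArc matrix p.1 p.2))
      (fun i => (pvRow matrix m i).map (fun p => |pvCell matrix p.1 p.2|)) _ ?_ ([], [])).trans ?_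
  · intro s i hi
    obtain ⟨hi0, hin⟩ := PySem.List.mem_pyRange_one.mp hi
    refine (pv_foldl_pair _ (fun j => if pvCell matrix i j ≠ 0 then [pvArc matrix i j] else [])
        (fun j => if pvCell matrix i j ≠ 0 then [|pvCell matrix i j|] else []) _ ?_ s).trans ?_
    · intro t j hj
      obtain ⟨hj0, hjm⟩ := PySem.List.mem_pyRange_one.mp hj
      show (if pvCell matrix i j ≠ 0 then
              if pvCell matrix i j > 0 then
                (t.1 ++ [(PySem.List.pyGetD ((PySem.List.pyRange 0 m).map (fun j => "e_" ++ PySem.Int.toStr (j + 1))) j "",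
                          PySem.List.pyGetD ((PySem.List.pyRange 0 n).map (fun i => "v_" ++ PySem.Int.toStr (i + 1))) i "")],
                 t.2 ++ [|pvCell matrix i j|])
              else
                (t.1 ++ [(PySem.List.pyGetD ((PySem.List.pyRange 0 n).map (fun i => "v_" ++ PySem.Int.toStr (i + 1))) i "",
                          PySem.List.pyGetD ((PySem.List.pyRange 0 m).map (fun j => "e_" ++ PySem.Int.toStr (j + 1))) j "")],
                 t.2 ++ [|pvCell matrix i j|])
            else t) = _
      rw [PySem.List.pyGetD_map_pyRange_of_nonneg (fun j => "e_" ++ PySem.Int.toStr (j + 1)) m j "" hj0 hjm,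
          PySem.List.pyGetD_map_pyRange_of_nonneg (fun i => "v_" ++ PySem.Int.toStr (i + 1)) n i "" hi0 hin]
      by_cases h0 : pvCell matrix i j = 0
      · simp [h0]
      · by_cases hpos : pvCell matrix i j > 0
        · simp [h0, hpos, pvArc, pvT, pvP]
        · simp [h0, hpos, pvArc, pvT, pvP]
    · rw [pv_flatMap_if _ (fun j => pvCell matrix i j ≠ 0) (fun j => pvArc matrix i j),
          pv_flatMap_if _ (fun j => pvCell matrix i j ≠ 0) (fun j => |pvCell matrix i j|)]
      simp [pvRow, List.map_map, Function.comp]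
  · simp [pvC, List.map_flatMap]

set_option maxHeartbeats 1600000 in
theorem pvA_eq (matrix : List (List Int)) : generate_petri_tex matrix = pvRender matrix := by
  have hfold := pvA_fold matrix (matrix.length : Int) ((PySem.List.pyGetD matrix 0 []).length : Int)
  simp only [generate_petri_tex, pvRender]
  refine congrArg₂ (· ++ ·) (congrArg₂ (· ++ ·) (congrArg₂ (· ++ ·) (congrArg₂ (· ++ ·) rfl ?hF) ?hW) ?hM0) rfl
  case hF =>
    refine congrArg₂ (· ++ ·) (congrArg₂ (· ++ ·) rfl (congrArg (PySem.Str.join ", ") ?_)) rfl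
    have e1 := congrArg (fun z : List (String × String) × List Int =>
      z.1.map (fun arc => "(" ++ arc.1 ++ ", " ++ arc.2 ++ ")")) hfold
    have e2 : ((pvC matrix (matrix.length : Int) ((PySem.List.pyGetD matrix 0 []).length : Int)).map
        (fun p => pvArc matrix p.1 p.2)).map (fun arc => "(" ++ arc.1 ++ ", " ++ arc.2 ++ ")")
        = (pvC matrix (matrix.length : Int) ((PySem.List.pyGetD matrix 0 []).length : Int)).map
          (fun p => pvFmt (pvArc matrix p.1 p.2)) := by
      rw [List.map_map]
      rfl
    exact e1.trans e2
  case hW =>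
    refine congrArg₂ (· ++ ·) (congrArg₂ (· ++ ·) rfl (congrArg (PySem.Str.join ", ") ?_)) rfl
    exact congrArg (fun z : List (String × String) × List Int => z.2.map PySem.Int.toStr) hfold
  case hM0 =>
    refine congrArg₂ (· ++ ·) (congrArg₂ (· ++ ·) rfl (congrArg (PySem.Str.join ", ") ?_)) rfl
    have e1 := congrArg (fun z : List (String × String) × List Int =>
      ((PySem.List.pyRange 0 (matrix.length : Int)).map (fun i => "v_" ++ PySem.Int.toStr (i + 1))).map
        (fun place => PySem.Int.toStr ((pvDictOf z.1 z.2).getD place 0))) hfold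
    exact e1.trans (pvA_M0 matrix (matrix.length : Int) ((PySem.List.pyGetD matrix 0 []).length : Int))

-- B's staged lists rewritten to the canonical pieces
theorem pvB_arcs (matrix : List (List Int)) (n m : Int) :
    (pvC matrix n m).map (fun c =>
      if PySem.List.pyGetD (PySem.List.pyGetD matrix c.1 []) c.2 0 > 0 then
        "(" ++ pvT c.2 ++ ", " ++ pvP c.1 ++ ")"
      else
        "(" ++ pvP c.1 ++ ", " ++ pvT c.2 ++ ")")
    = (pvC matrix n m).map (fun p => pvFmt (pvArc matrix p.1 p.2)) := by
  apply List.map_congr_left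
  intro c _
  show (if pvCell matrix c.1 c.2 > 0 then _ else _) = _
  rw [pvFmt, pvArc]
  split_ifs <;> rfl

theorem pvB_marking (matrix : List (List Int)) (n m : Int) :
    (PySem.List.pyRange 0 n).map (fun i =>
      PySem.Int.toStr (((PySem.List.pyRange 0 m).filter
          (fun j => PySem.List.pyGetD (PySem.List.pyGetD matrix i []) j 0 < 0)).map
        (fun j => -PySem.List.pyGetD (PySem.List.pyGetD matrix i []) j 0)).sum)
    = ((PySem.List.pyRange 0 n).map (fun i => pvMark matrix m i)).map PySem.Int.toStr := by
  rw [List.map_map]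
  apply List.map_congr_left
  intro i _
  show PySem.Int.toStr (((PySem.List.pyRange 0 m).filter
      (fun j => decide (pvCell matrix i j < 0))).map (fun j => -pvCell matrix i j)).sum = _
  rw [pv_sum_map_ite]
  simp only [Function.comp_apply]
  rw [pvMark]
  apply congrArg
  apply congrArg
  apply List.map_congr_left
  intro j _
  by_cases hc : pvCell matrix i j < 0
  · rw [if_pos (by simpa using hc), if_neg (by omega), if_pos hc]
  · rw [if_neg (by simpa using hc)]
    split_ifs <;> rfl

set_option maxHeartbeats 1600000 in
theorem pvB_eq (matrix : List (List Int)) : generate_petri_tex_alt matrix = pvRender matrix := by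
  simp only [generate_petri_tex_alt, pvRender]
  rw [show ((PySem.List.pyRange 0 (matrix.length : Int)).flatMap (fun i =>
      ((PySem.List.pyRange 0 ((PySem.List.pyGetD matrix 0 []).length : Int)).filter
        (fun j => PySem.List.pyGetD (PySem.List.pyGetD matrix i []) j 0 ≠ 0)).map (fun j => (i, j))))
      = pvC matrix (matrix.length : Int) ((PySem.List.pyGetD matrix 0 []).length : Int) from rfl]
  rw [pvB_arcs, pvB_marking]
  rw [show (pvC matrix (matrix.length : Int) ((PySem.List.pyGetD matrix 0 []).length : Int)).map
      (fun c => PySem.Int.toStr |PySem.List.pyGetD (PySem.List.pyGetD matrix c.1 []) c.2 0|)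
      = ((pvC matrix (matrix.length : Int) ((PySem.List.pyGetD matrix 0 []).length : Int)).map
          (fun p => |pvCell matrix p.1 p.2|)).map PySem.Int.toStr from by rw [List.map_map]; rfl]
  rw [show ((PySem.List.pyRange 0 (matrix.length : Int)).map (fun i => pvP i))
      = ((PySem.List.pyRange 0 (matrix.length : Int)).map (fun i => "v_" ++ PySem.Int.toStr (i + 1))) from rfl]
  rw [show ((PySem.List.pyRange 0 ((PySem.List.pyGetD matrix 0 []).length : Int)).map (fun j => pvT j))
      = ((PySem.List.pyRange 0 ((PySem.List.pyGetD matrix 0 []).length : Int)).map (fun j => "e_" ++ PySem.Int.toStr (j + 1))) from rfl]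
  apply String.toList_injective
  simp [PySem.Str.join, PySem.Chars.join_cons_cons, PySem.Chars.join_singleton, String.toList_append]

-- ===== VERDICT (by name: the statement is the Claim_ definition above) =====
theorem generate_petri_tex_spec : Claim_equal_generate_petri_tex := by
  intro matrix _ _
  unfold Spec_generate_petri_tex
  exact (pvA_eq matrix).trans (pvB_eq matrix).symm
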